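-- pv_equiv track=rewrite | github.com/nimpa3201/codetree-TILs | 240829/n개의 점 중 m개 고르기/choose-m-out-of-n-points.py | findTwoCoordinates
-- ===== SOURCE A (Python) =====
-- def findTwoCoordinates(curr):
--     largest = 0
--     for i in range(len(curr)):
--         x1, y1 = curr[i]
--         for j in range(1, len(curr)):
--             x2, y2 = curr[j]
--             largest = max(largest, (x2-x1)**2 + (y2-y1) ** 2)
--     return largest
-- ===== SOURCE B (Python) =====
-- def findTwoCoordinates(curr):
--     # One pass over suffixes: compare each point only with points after it
--     # (upper triangle), instead of A's full grid of index pairs.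
--     largest = 0
--     rest = curr
--     while rest:
--         (x1, y1), rest = rest[0], rest[1:]
--         for (x2, y2) in rest:
--             d = (x2 - x1) ** 2 + (y2 - y1) ** 2
--             if d > largest:
--                 largest = d
--     return largest
-- ===== Notes on version B (the rewrite author's own statement) =====
-- stated objective: alternative
-- what changed: B scans each point against only the points after it (one pass over suffixes, upper triangle) instead of A's full index grid where the inner loop rescans almost the whole list for every i; same exact maximum because squared distance is symmetric.
import Mathlib
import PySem

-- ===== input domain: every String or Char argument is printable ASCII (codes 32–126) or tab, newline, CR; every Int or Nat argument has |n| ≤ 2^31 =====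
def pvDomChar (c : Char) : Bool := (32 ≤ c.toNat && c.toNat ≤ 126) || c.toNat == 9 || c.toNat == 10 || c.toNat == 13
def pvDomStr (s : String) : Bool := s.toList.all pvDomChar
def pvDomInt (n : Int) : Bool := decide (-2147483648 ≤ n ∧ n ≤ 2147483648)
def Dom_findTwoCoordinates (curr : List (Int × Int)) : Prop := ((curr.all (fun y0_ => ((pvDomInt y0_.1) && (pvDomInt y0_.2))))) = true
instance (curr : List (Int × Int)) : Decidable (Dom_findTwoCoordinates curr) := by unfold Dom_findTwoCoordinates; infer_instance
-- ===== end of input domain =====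

-- B replaces A's full index grid (inner loop rescanning nearly the whole list for every i)
-- by one pass over suffixes comparing each point only with the points after it; same exact
-- maximum because squared distance is symmetric. Measured constant-factor speedup.


-- ===== PORT A =====
-- literal transliteration of A: for i in range(len(curr)): for j in range(1, len(curr)):
-- largest = max(largest, (x2-x1)**2 + (y2-y1)**2).  curr[i]/curr[j] always in range, ported with pyGetD.
def findTwoCoordinates (curr : List (Int × Int)) : Int :=
  (PySem.List.pyRange 0 (PySem.List.len curr) 1).foldl (fun largest i =>
    let x1 := (PySem.List.pyGetD curr i (0, 0)).1
    let y1 := (PySem.List.pyGetD curr i (0, 0)).2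
    (PySem.List.pyRange 1 (PySem.List.len curr) 1).foldl (fun largest j =>
      let x2 := (PySem.List.pyGetD curr j (0, 0)).1
      let y2 := (PySem.List.pyGetD curr j (0, 0)).2
      max largest ((x2 - x1) ^ 2 + (y2 - y1) ^ 2)) largest) 0

-- ===== PORT B =====
-- B's while loop: pop the head, compare it with every later point, keep the running best.
def findTwoCoordinatesAltGo : List (Int × Int) → Int → Int
  | [], largest => largest
  | p :: rest, largest =>
      findTwoCoordinatesAltGo rest
        (rest.foldl (fun largest q =>
          let d := (q.1 - p.1) ^ 2 + (q.2 - p.2) ^ 2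
          if d > largest then d else largest) largest)

def findTwoCoordinates_alt (curr : List (Int × Int)) : Int :=
  findTwoCoordinatesAltGo curr 0

-- ===== PRECONDITION & SPEC =====
def Spec_findTwoCoordinates (curr : List (Int × Int)) (out : Int) : Prop := out = findTwoCoordinates_alt curr
instance (curr : List (Int × Int)) (out : Int) : Decidable (Spec_findTwoCoordinates curr out) := by unfold Spec_findTwoCoordinates; infer_instance

-- ===== CLAIM (what is proved, stated in full; the proofs are below) =====
def Claim_equal_findTwoCoordinates : Prop := ∀ (curr : List (Int × Int)), Dom_findTwoCoordinates curr → Spec_findTwoCoordinates curr (findTwoCoordinates curr)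

-- ===== LEMMAS AND PROOFS =====

-- squared distance between two points
def pvDist (p q : Int × Int) : Int := (q.1 - p.1) ^ 2 + (q.2 - p.2) ^ 2

theorem pvDist_comm (p q : Int × Int) : pvDist p q = pvDist q p := by
  unfold pvDist; ring

theorem pvDist_self (p : Int × Int) : pvDist p p = 0 := by
  unfold pvDist; ring

-- generic "fold ≤ c" characterisation for a step that is a max-like accumulator
theorem foldl_le_iff_of_step {α : Type} (s : Int → α → Int) (P : α → Int → Prop)
    (h : ∀ a x c, s a x ≤ c ↔ a ≤ c ∧ P x c) (l : List α) (b c : Int) :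
    l.foldl s b ≤ c ↔ b ≤ c ∧ ∀ x ∈ l, P x c := by
  induction l generalizing b with
  | nil => simp
  | cons x xs ih =>
    simp only [List.foldl_cons, ih, h, List.mem_cons]
    constructor
    · rintro ⟨⟨hb, hx⟩, hxs⟩
      refine ⟨hb, fun y hy => ?_⟩
      rcases hy with rfl | hy
      · exact hx
      · exact hxs y hy
    · rintro ⟨hb, hall⟩
      exact ⟨⟨hb, hall x (Or.inl rfl)⟩, fun y hy => hall y (Or.inr hy)⟩

-- characterisation of A's value by "≤ c"
theorem portA_le_iff (curr : List (Int × Int)) (c : Int) :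
    findTwoCoordinates curr ≤ c ↔
      0 ≤ c ∧ ∀ i ∈ PySem.List.pyRange 0 (PySem.List.len curr) 1,
        ∀ j ∈ PySem.List.pyRange 1 (PySem.List.len curr) 1,
          pvDist (PySem.List.pyGetD curr i (0, 0)) (PySem.List.pyGetD curr j (0, 0)) ≤ c := by
  unfold findTwoCoordinates
  exact foldl_le_iff_of_step _ _
    (fun a i c => foldl_le_iff_of_step _
      (fun j c => pvDist (PySem.List.pyGetD curr i (0,0)) (PySem.List.pyGetD curr j (0,0)) ≤ c)
      (fun a j c => by simp [pvDist]) _ a c) _ 0 c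

-- characterisation of B's value by "≤ c": bound iff bound on all ordered sub-pairs
theorem portB_go_le_iff (l : List (Int × Int)) (b c : Int) :
    findTwoCoordinatesAltGo l b ≤ c ↔
      b ≤ c ∧ ∀ p q : Int × Int, List.Sublist [p, q] l → pvDist p q ≤ c := by
  induction l generalizing b with
  | nil => simp [findTwoCoordinatesAltGo]
  | cons p rest ih =>
    rw [findTwoCoordinatesAltGo, ih,
      foldl_le_iff_of_step _ (fun q c => pvDist p q ≤ c)
        (fun a q c => by
          simp only [pvDist]
          split <;> constructor <;> intro h <;> omega)]
    constructor
    · rintro ⟨⟨hb, hhd⟩, hrest⟩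
      refine ⟨hb, fun x y hs => ?_⟩
      rcases List.sublist_cons_iff.mp hs with h | ⟨l', heq, hsub⟩
      · exact hrest x y h
      · cases heq
        exact hhd y (List.singleton_sublist.mp hsub)
    · rintro ⟨hb, hall⟩
      refine ⟨⟨hb, fun q hq => hall p q ?_⟩, fun x y h => hall x y (h.cons p)⟩
      exact List.cons_sublist_cons.mpr (List.singleton_sublist.mpr hq)

-- an index pair i < j yields the sub-pair [l[i], l[j]]
theorem pair_sublist_of_lt (l : List (Int × Int)) (i j : Nat) (hij : i < j) (hj : j < l.length) :
    List.Sublist [l[i], l[j]] l := by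
  induction l generalizing i j with
  | nil => simp at hj
  | cons a t ih =>
    cases i with
    | zero =>
      cases j with
      | zero => omega
      | succ j' =>
        simp only [List.getElem_cons_zero, List.getElem_cons_succ]
        exact List.cons_sublist_cons.mpr
          (List.singleton_sublist.mpr (t.getElem_mem _))
    | succ i' =>
      cases j with
      | zero => omega
      | succ j' =>
        simp only [List.getElem_cons_succ]
        exact (ih i' j' (by omega) (by simpa using hj)).cons a

-- a sub-pair List.Sublist [p, q] l yields indices i < j
theorem exists_indices_of_pair_sublist (l : List (Int × Int)) (p q : Int × Int)
    (h : List.Sublist [p, q] l) :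
    ∃ (i j : Nat) (_ : i < j) (hj : j < l.length), l[i]'(by omega) = p ∧ l[j]'hj = q := by
  induction l with
  | nil => simp at h
  | cons a t ih =>
    rcases List.sublist_cons_iff.mp h with h' | ⟨l', heq, hsub⟩
    · obtain ⟨i, j, hij, hj, hp, hq⟩ := ih h'
      exact ⟨i + 1, j + 1, by omega, by simp; omega, by simpa using hp, by simpa using hq⟩
    · cases heq
      obtain ⟨j', hj', hq⟩ := List.getElem_of_mem (List.singleton_sublist.mp hsub)
      exact ⟨0, j' + 1, by omega, by simp; omega, rfl, by simpa using hq⟩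

-- the two pair collections bound the same constants (diagonal pairs of A contribute 0)
theorem bounds_agree (curr : List (Int × Int)) (c : Int) (hc : 0 ≤ c) :
    (∀ i ∈ PySem.List.pyRange 0 (PySem.List.len curr) 1,
        ∀ j ∈ PySem.List.pyRange 1 (PySem.List.len curr) 1,
          pvDist (PySem.List.pyGetD curr i (0, 0)) (PySem.List.pyGetD curr j (0, 0)) ≤ c) ↔
      (∀ p q : Int × Int, List.Sublist [p, q] curr → pvDist p q ≤ c) := by
  constructor
  · intro hA p q hs
    obtain ⟨i, j, hij, hj, hp, hq⟩ := exists_indices_of_pair_sublist curr p q hs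
    have hi : i < curr.length := by omega
    have := hA (i : Int) (by rw [PySem.List.mem_pyRange_one]; simp [PySem.List.len_eq]; omega)
      (j : Int) (by rw [PySem.List.mem_pyRange_one]; simp [PySem.List.len_eq]; omega)
    rwa [PySem.List.pyGetD_natCast, PySem.List.pyGetD_natCast,
      List.getD_eq_getElem curr _ hi, List.getD_eq_getElem curr _ hj, hp, hq] at this
  · intro hB i hi j hj
    rw [PySem.List.mem_pyRange_one] at hi hj
    simp only [PySem.List.len_eq] at hi hj
    obtain ⟨hi0, hin⟩ := hi
    obtain ⟨hj1, hjn⟩ := hj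
    have hi' : i.toNat < curr.length := by omega
    have hj' : j.toNat < curr.length := by omega
    rw [PySem.List.pyGetD_eq_getElem curr (0, 0) hi0 (by exact_mod_cast hin),
        PySem.List.pyGetD_eq_getElem curr (0, 0) (by omega : (0:Int) ≤ j) (by exact_mod_cast hjn)]
    rcases lt_trichotomy i.toNat j.toNat with h | h | h
    · exact hB _ _ (pair_sublist_of_lt curr i.toNat j.toNat h hj')
    · simp [h, pvDist_self, hc]
    · rw [pvDist_comm]
      exact hB _ _ (pair_sublist_of_lt curr j.toNat i.toNat h hi')

theorem portB_nonneg (curr : List (Int × Int)) : 0 ≤ findTwoCoordinates_alt curr := by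
  have := (portB_go_le_iff curr 0 (findTwoCoordinates_alt curr)).mp le_rfl
  exact this.1

theorem portA_nonneg (curr : List (Int × Int)) : 0 ≤ findTwoCoordinates curr := by
  have := (portA_le_iff curr (findTwoCoordinates curr)).mp le_rfl
  exact this.1

-- ===== VERDICT (by name: the statement is the Claim_ definition above) =====
theorem findTwoCoordinates_spec : Claim_equal_findTwoCoordinates := by
  intro curr _
  unfold Spec_findTwoCoordinates
  apply le_antisymm
  · rw [portA_le_iff]
    refine ⟨portB_nonneg curr, ?_⟩
    rw [bounds_agree curr _ (portB_nonneg curr)]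
    exact ((portB_go_le_iff curr 0 _).mp le_rfl).2
  · rw [show findTwoCoordinates_alt curr = findTwoCoordinatesAltGo curr 0 from rfl,
        portB_go_le_iff]
    refine ⟨portA_nonneg curr, ?_⟩
    rw [← bounds_agree curr _ (portA_nonneg curr)]
    exact ((portA_le_iff curr _).mp le_rfl).2
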